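-- pv_equiv track=rewrite | github.com/matteo027/architetchures-for-code-developement-llm4se | code/task09_4.py | get_substring
-- ===== SOURCE A (Python) =====
-- def get_substring(a: int, b: int, c: int, d: int) -> str:
--     """
--     Generates a string f(A, B) and extracts a substring from c to d (1-based).
--
--     Parameters:
--     - a (int): The number of 'A' characters.
--     - b (int): The number of 'B' characters.
--     - c (int): The starting index of the substring (1-based).
--     - d (int): The ending index of the substring (1-based).
--
--     Returns:
--     - str: The extracted substring from c to d.
--     """
--     # Generate the string f(A, B)
--     result = []
--     total_length = a + b
--     while a > 0 or b > 0:
--         # Determine which character to append based on the remaining length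
--         if a > b:
--             result.append('A')
--             a -= 1
--         elif b > a:
--             result.append('B')
--             b -= 1
--         else:
--             # If both remain equal, decide which one to append first
--             if not result or result[-1] == 'B':
--                 result.append('A')
--                 a -= 1
--             else:
--                 result.append('B')
--                 b -= 1
--     # Convert list to string
--     f_ab = ''.join(result)
--     # Extract the substring from c to d (1-based)
--     return f_ab[c-1:d]
-- ===== SOURCE B (Python) =====
-- def get_substring(a: int, b: int, c: int, d: int) -> str:
--     # A negative count contributes no characters.
--     a = max(a, 0)
--     b = max(b, 0)
--     # Closed form: the balanced string is a run of the majority character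
--     # followed by a strict two-character alternation (ties start with 'A').
--     if a > b:
--         s = 'A' * (a - b) + 'BA' * b
--     else:
--         s = 'B' * (b - a) + 'AB' * a
--     return s[c - 1:d]
-- ===== Notes on version B (the rewrite author's own statement) =====
-- stated objective: faster
-- what changed: A builds the balanced string character by character in a greedy while-loop; B writes it down in closed form (a run of the majority character followed by a two-character alternation, via string repetition) and slices it.
import Mathlib
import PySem

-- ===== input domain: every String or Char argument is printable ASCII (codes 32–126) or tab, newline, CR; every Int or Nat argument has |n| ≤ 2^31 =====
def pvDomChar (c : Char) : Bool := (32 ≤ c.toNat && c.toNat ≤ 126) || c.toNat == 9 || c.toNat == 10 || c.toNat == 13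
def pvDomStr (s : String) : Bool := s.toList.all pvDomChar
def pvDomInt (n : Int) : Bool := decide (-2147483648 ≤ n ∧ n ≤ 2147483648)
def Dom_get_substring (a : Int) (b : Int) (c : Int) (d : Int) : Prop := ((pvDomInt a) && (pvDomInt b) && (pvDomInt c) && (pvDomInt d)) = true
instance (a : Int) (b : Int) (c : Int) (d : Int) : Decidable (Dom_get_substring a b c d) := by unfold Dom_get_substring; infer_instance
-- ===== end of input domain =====

-- B replaces A's character-by-character generation loop by the closed form of the
-- balanced string (a run of the majority character followed by a two-character
-- alternation, built by string repetition) and then slices it.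

-- ===== PORT A =====
-- A's while-loop; the fuel argument is only a totality guard (the loop runs
-- exactly a.toNat + b.toNat times), the body is A's loop body verbatim.
def loopA (fuel : Nat) (a : Int) (b : Int) (result : List Char) : List Char :=
  match fuel with
  | 0 => result
  | fuel + 1 =>
    if a > 0 ∨ b > 0 then
      if a > b then loopA fuel (a - 1) b (result ++ ['A'])
      else if b > a then loopA fuel a (b - 1) (result ++ ['B'])
      else if result = [] ∨ PySem.List.pyGet? result (-1) = some 'B' then
        loopA fuel (a - 1) b (result ++ ['A'])
      else loopA fuel a (b - 1) (result ++ ['B'])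
    else result

def get_substring (a : Int) (b : Int) (c : Int) (d : Int) : String :=
  let f_ab := loopA (a.toNat + b.toNat) a b []
  String.ofList (PySem.List.slice f_ab (some (c - 1)) (some d))

-- ===== PORT B =====
def get_substring_alt (a : Int) (b : Int) (c : Int) (d : Int) : String :=
  let a' := max a 0
  let b' := max b 0
  let s := if a' > b' then
      PySem.List.pyRepeat ['A'] (a' - b') ++ PySem.List.pyRepeat ['B', 'A'] b'
    else
      PySem.List.pyRepeat ['B'] (b' - a') ++ PySem.List.pyRepeat ['A', 'B'] a'
  String.ofList (PySem.List.slice s (some (c - 1)) (some d))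

-- ===== PRECONDITION & SPEC =====
def Spec_get_substring (a : Int) (b : Int) (c : Int) (d : Int) (out : String) : Prop := out = get_substring_alt a b c d
instance (a : Int) (b : Int) (c : Int) (d : Int) (out : String) : Decidable (Spec_get_substring a b c d out) := by unfold Spec_get_substring; infer_instance

-- ===== CLAIM =====
def Claim_equal_get_substring : Prop := ∀ (a : Int) (b : Int) (c : Int) (d : Int), Dom_get_substring a b c d → Spec_get_substring a b c d (get_substring a b c d)

-- ===== LEMMAS AND PROOFS =====

-- 'AB' repeated n times / 'BA' repeated n times
def abN : Nat → List Char
  | 0 => []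
  | n + 1 => 'A' :: 'B' :: abN n

def baN : Nat → List Char
  | 0 => []
  | n + 1 => 'B' :: 'A' :: baN n

-- closed form of A's loop tail: what loopA a b res appends to res,
-- k = (res is empty or ends in 'B')
def G (a : Int) (b : Int) (k : Bool) : List Char :=
  if b.toNat < a.toNat then List.replicate (a.toNat - b.toNat) 'A' ++ baN b.toNat
  else if a.toNat < b.toNat then List.replicate (b.toNat - a.toNat) 'B' ++ abN a.toNat
  else if k then abN a.toNat else baN a.toNat

lemma G_stepA (a b : Int) (k : Bool) (ha : 0 < a) (hab : b < a) :
    G a b k = 'A' :: G (a - 1) b false := by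
  have h1 : (a - 1).toNat = a.toNat - 1 := by omega
  have h2 : b.toNat ≤ a.toNat - 1 := by omega
  unfold G
  rw [h1]
  rcases Nat.lt_or_ge b.toNat (a.toNat - 1) with h | h
  · rw [if_pos (by omega), if_pos h]
    have : a.toNat - b.toNat = (a.toNat - 1 - b.toNat) + 1 := by omega
    rw [this, List.replicate_succ, List.cons_append]
  · have he : a.toNat - 1 = b.toNat := by omega
    rw [if_pos (by omega), if_neg (by omega), if_neg (by omega), if_neg (by simp), he]
    have : a.toNat - b.toNat = 1 := by omega
    rw [this]
    simp

lemma G_stepB (a b : Int) (k : Bool) (hb : 0 < b) (hba : a < b) :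
    G a b k = 'B' :: G a (b - 1) true := by
  have h1 : (b - 1).toNat = b.toNat - 1 := by omega
  unfold G
  rw [h1]
  rcases Nat.lt_or_ge a.toNat (b.toNat - 1) with h | h
  · rw [if_neg (by omega), if_pos (by omega), if_neg (by omega), if_pos h]
    have : b.toNat - a.toNat = (b.toNat - 1 - a.toNat) + 1 := by omega
    rw [this, List.replicate_succ, List.cons_append]
  · have he : b.toNat - 1 = a.toNat := by omega
    rw [if_neg (by omega), if_pos (by omega), if_neg (by omega), if_neg (by omega),
        if_pos rfl]
    have : b.toNat - a.toNat = 1 := by omega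
    rw [this]
    simp

lemma G_stepEqA (a : Int) (ha : 0 < a) :
    G a a true = 'A' :: G (a - 1) a false := by
  have h1 : (a - 1).toNat = a.toNat - 1 := by omega
  unfold G
  rw [h1]
  rw [if_neg (by omega), if_neg (by omega), if_pos rfl,
      if_neg (by omega), if_pos (by omega)]
  have : a.toNat - (a.toNat - 1) = 1 := by omega
  rw [this]
  have h2 : a.toNat = (a.toNat - 1) + 1 := by omega
  rw [h2, abN]
  simp [h2.symm]

lemma G_stepEqB (a : Int) (ha : 0 < a) :
    G a a false = 'B' :: G a (a - 1) true := by
  have h1 : (a - 1).toNat = a.toNat - 1 := by omega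
  unfold G
  rw [h1]
  rw [if_neg (by omega), if_neg (by omega), if_neg (by simp),
      if_pos (by omega)]
  have : a.toNat - (a.toNat - 1) = 1 := by omega
  rw [this]
  have h2 : a.toNat = (a.toNat - 1) + 1 := by omega
  rw [h2, baN]
  simp [h2.symm]

lemma G_stop (a b : Int) (k : Bool) (h : ¬(a > 0 ∨ b > 0)) : G a b k = [] := by
  have ha : a.toNat = 0 := by omega
  have hb : b.toNat = 0 := by omega
  unfold G
  rw [ha, hb]
  simp [abN, baN]

lemma loopA_eq (N : Nat) : ∀ (a b : Int) (res : List Char), a.toNat + b.toNat ≤ N →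
    loopA N a b res = res ++ G a b (decide (res = [] ∨ PySem.List.pyGet? res (-1) = some 'B')) := by
  induction N with
  | zero =>
    intro a b res h
    have : ¬(a > 0 ∨ b > 0) := by omega
    rw [G_stop a b _ this, List.append_nil]
    rfl
  | succ N ih =>
    intro a b res h
    show (if a > 0 ∨ b > 0 then _ else _) = _
    by_cases hcond : a > 0 ∨ b > 0
    · rw [if_pos hcond]
      by_cases hab : a > b
      · have ha : 0 < a := by omega
        rw [if_pos hab, ih (a - 1) b (res ++ ['A']) (by omega)]
        simp [PySem.List.pyGet?_neg_one_append_singleton,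
              G_stepA a b _ ha (by omega)]
      · by_cases hba : b > a
        · have hb : 0 < b := by omega
          rw [if_neg hab, if_pos hba, ih a (b - 1) (res ++ ['B']) (by omega)]
          simp [PySem.List.pyGet?_neg_one_append_singleton,
                G_stepB a b _ hb (by omega)]
        · have heq : a = b := by omega
          have ha : 0 < a := by omega
          subst heq
          by_cases hk : res = [] ∨ PySem.List.pyGet? res (-1) = some 'B'
          · rw [if_neg hab, if_neg hba, if_pos hk,
                ih (a - 1) a (res ++ ['A']) (by omega)]
            simp [PySem.List.pyGet?_neg_one_append_singleton, hk,
                  G_stepEqA a ha]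
          · rw [if_neg hab, if_neg hba, if_neg hk,
                ih a (a - 1) (res ++ ['B']) (by omega)]
            simp [PySem.List.pyGet?_neg_one_append_singleton, hk,
                  G_stepEqB a ha]
    · rw [if_neg hcond, G_stop a b _ hcond, List.append_nil]

lemma loopA_closed (a b : Int) : loopA (a.toNat + b.toNat) a b [] = G a b true := by
  rw [loopA_eq (a.toNat + b.toNat) a b [] le_rfl]
  simp

lemma pyRepeat_BA (n : Int) :
    PySem.List.pyRepeat (['B', 'A'] : List Char) n = baN n.toNat := by
  have h : ∀ m : Nat, List.flatten (List.replicate m (['B', 'A'] : List Char)) = baN m := by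
    intro m
    induction m with
    | zero => simp [baN]
    | succ m ih => simp [List.replicate_succ, baN, ih]
  rw [← h n.toNat]
  simp [PySem.List.pyRepeat]

lemma pyRepeat_AB (n : Int) :
    PySem.List.pyRepeat (['A', 'B'] : List Char) n = abN n.toNat := by
  have h : ∀ m : Nat, List.flatten (List.replicate m (['A', 'B'] : List Char)) = abN m := by
    intro m
    induction m with
    | zero => simp [abN]
    | succ m ih => simp [List.replicate_succ, abN, ih]
  rw [← h n.toNat]
  simp [PySem.List.pyRepeat]

-- A's generated string is exactly B's closed form (with counts clamped at 0)
lemma G_closed (a b : Int) :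
    G a b true =
      if max a 0 > max b 0 then
        PySem.List.pyRepeat ['A'] (max a 0 - max b 0) ++ PySem.List.pyRepeat ['B', 'A'] (max b 0)
      else
        PySem.List.pyRepeat ['B'] (max b 0 - max a 0) ++ PySem.List.pyRepeat ['A', 'B'] (max a 0) := by
  rw [PySem.List.pyRepeat_singleton, PySem.List.pyRepeat_singleton,
      pyRepeat_BA, pyRepeat_AB]
  unfold G
  have hma : (max a 0).toNat = a.toNat := by omega
  have hmb : (max b 0).toNat = b.toNat := by omega
  rcases Nat.lt_trichotomy a.toNat b.toNat with h | h | h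
  · rw [if_neg (by omega), if_pos (by omega), if_neg (by omega), hma,
        show (max b 0 - max a 0).toNat = b.toNat - a.toNat by omega]
  · rw [if_neg (by omega), if_neg (by omega), if_pos rfl,
        if_neg (show ¬ max a 0 > max b 0 by omega), hma,
        show (max b 0 - max a 0).toNat = 0 by omega]
    simp
  · rw [if_pos (by omega), if_pos (by omega), hmb,
        show (max a 0 - max b 0).toNat = a.toNat - b.toNat by omega]

-- ===== VERDICT (by name: the statement is the Claim_ definition above) =====
theorem get_substring_spec : Claim_equal_get_substring := by
  intro a b c d _
  unfold Spec_get_substring get_substring get_substring_alt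
  rw [loopA_closed, G_closed a b]
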